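-- pv_equiv track=rewrite | github.com/dby888/credit_rating_recommend | app_run.py | shorten_company_name
-- ===== SOURCE A (Python) =====
-- def shorten_company_name(name: str) -> str:
--     if not name:
--         return ""
--     cut_tokens = [",", " Inc", " Ltd", " Limited", " PLC", " Corp", " Corporation", " Co."]
--     short = name
--     for tok in cut_tokens:
--         if tok in short:
--             short = short.split(tok)[0]
--     short = short.strip()
--     if len(short) > 28:
--         short = short[:25].rstrip() + "…"
--     return short
-- ===== SOURCE B (Python) =====
-- def shorten_company_name(name: str) -> str:
--     if not name:
--         return ""
--     cut_tokens = [",", " Inc", " Ltd", " Limited", " PLC", " Corp", " Corporation", " Co."]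
--     m = len(name)
--     for tok in cut_tokens:
--         i = name.find(tok)
--         if i != -1 and i < m:
--             m = i
--     short = name[:m].strip()
--     if len(short) > 28:
--         short = short[:25].rstrip() + "…"
--     return short
-- ===== Notes on version B (the rewrite author's own statement) =====
-- stated objective: alternative
-- what changed: A repeatedly splits a shrinking string at each present suffix token and keeps piece 0; B makes one min-of-find pass over the original name to compute a single cut index and slices once, then strips/truncates identically.
import Mathlib
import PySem

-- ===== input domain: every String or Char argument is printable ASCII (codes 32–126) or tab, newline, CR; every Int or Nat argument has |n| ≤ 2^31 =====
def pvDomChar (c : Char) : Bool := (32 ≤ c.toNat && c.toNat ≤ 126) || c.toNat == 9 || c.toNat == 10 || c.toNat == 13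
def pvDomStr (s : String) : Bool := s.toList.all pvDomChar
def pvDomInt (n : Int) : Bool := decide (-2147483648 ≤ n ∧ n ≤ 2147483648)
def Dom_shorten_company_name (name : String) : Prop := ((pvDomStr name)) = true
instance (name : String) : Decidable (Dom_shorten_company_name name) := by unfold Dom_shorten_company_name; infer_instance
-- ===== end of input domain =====

-- B replaces A's repeated split-and-reassign on a shrinking string by one min-of-find pass
-- over the original name followed by a single slice (objective: alternative decomposition).

-- ===== PORT A =====
-- the module-level constant list of A
def cutTokens : List String := [",", " Inc", " Ltd", " Limited", " PLC", " Corp", " Corporation", " Co."]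

-- literal port of A: successively split the current string at each present token and keep piece 0
def shorten_company_name (name : String) : String :=
  if name = "" then ""
  else
    let short := cutTokens.foldl (fun s tok =>
      if PySem.Str.isIn tok s then ((PySem.Str.split? s tok).getD []).headD "" else s) name
    let short := PySem.Str.strip short
    if 28 < PySem.Str.len short then
      PySem.Str.rstrip (PySem.Str.slice short none (some 25)) ++ "…"
    else short

-- ===== PORT B =====
-- literal port of B: one pass computing the minimal find-index over the original name, then one slice
def shorten_company_name_alt (name : String) : String :=
  if name = "" then ""
  else
    let m := cutTokens.foldl (fun (m : Int) tok =>
      let i := PySem.Str.find name tok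
      if i ≠ -1 ∧ i < m then i else m) (PySem.Str.len name)
    let short := PySem.Str.strip (PySem.Str.slice name none (some m))
    if 28 < PySem.Str.len short then
      PySem.Str.rstrip (PySem.Str.slice short none (some 25)) ++ "…"
    else short

-- ===== PRECONDITION & SPEC =====
def Spec_shorten_company_name (name : String) (out : String) : Prop := out = shorten_company_name_alt name
instance (name : String) (out : String) : Decidable (Spec_shorten_company_name name out) := by unfold Spec_shorten_company_name; infer_instance

-- ===== CLAIM (what is proved, stated in full; the proofs are below) =====
def Claim_equal_shorten_company_name : Prop := ∀ (name : String), Dom_shorten_company_name name → Spec_shorten_company_name name (shorten_company_name name)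

-- ===== LEMMAS AND PROOFS =====

-- index of the first occurrence of t in cs (cs.length+weird if absent; only used under t <:+: cs)
def firstIdx (t : List Char) : List Char → Nat
  | [] => 0
  | c :: rest => if t.isPrefixOf (c :: rest) then 0 else firstIdx t rest + 1

-- the pure cut step both folds compute
def stepN (cs : List Char) (c : Nat) (t : List Char) : Nat :=
  if t <:+: cs ∧ firstIdx t cs < c then firstIdx t cs else c

-- c is the full length or the first index of some token: such a cut never splits a later token's occurrence
def GoodCut (cs : List Char) (c : Nat) : Prop :=
  c = cs.length ∨ ∃ s ∈ cutTokens, s.toList <:+: cs ∧ c = firstIdx s.toList cs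

lemma firstIdx_le_length (t cs) : firstIdx t cs ≤ cs.length := by
  induction cs with
  | nil => simp [firstIdx]
  | cons c rest ih => simp only [firstIdx]; split <;> simp <;> omega

lemma firstIdx_spec {t cs : List Char} (h : t <:+: cs) :
    t <+: cs.drop (firstIdx t cs) ∧ ∀ i < firstIdx t cs, ¬ t <+: cs.drop i := by
  induction cs with
  | nil =>
    rcases List.eq_nil_of_infix_nil h with rfl
    simp [firstIdx]
  | cons c rest ih =>
    by_cases hp : t.isPrefixOf (c :: rest)
    · simp [firstIdx, hp, List.isPrefixOf_iff_prefix.mp hp]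
    · have hinf : t <:+: rest := by
        rcases List.infix_cons_iff.mp h with h1 | h1
        · exact absurd (List.isPrefixOf_iff_prefix.mpr h1) hp
        · exact h1
      obtain ⟨q1, q2⟩ := ih hinf
      have hfi : firstIdx t (c :: rest) = firstIdx t rest + 1 := by
        simp [firstIdx, hp]
      refine ⟨?_, ?_⟩
      · rw [hfi]; simpa using q1
      · intro i hi
        rw [hfi] at hi
        match i with
        | 0 => exact fun hpre => hp (List.isPrefixOf_iff_prefix.mpr hpre)
        | j + 1 => exact fun hpre => q2 j (by omega) (by simpa using hpre)

lemma firstIdx_add_le {t cs : List Char} (h : t <:+: cs) :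
    firstIdx t cs + t.length ≤ cs.length := by
  have h1 := (firstIdx_spec h).1
  have h2 := h1.length_le
  have h3 := firstIdx_le_length t cs
  simp [List.length_drop] at h2
  omega

-- uniqueness of the first-occurrence index
lemma firstIdx_eq_of_spec {t cs : List Char} {k : Nat}
    (h1 : t <+: cs.drop k) (h2 : ∀ i < k, ¬ t <+: cs.drop i) (h : t <:+: cs) :
    k = firstIdx t cs := by
  obtain ⟨q1, q2⟩ := firstIdx_spec h
  rcases lt_trichotomy k (firstIdx t cs) with hlt | he | hgt
  · exact absurd h1 (q2 k hlt)
  · exact he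
  · exact absurd q1 (h2 _ hgt)

lemma find_eq_firstIdx {t cs : List Char} (h : t <:+: cs) :
    PySem.Chars.find cs t = (firstIdx t cs : Int) := by
  have h0 : 0 ≤ PySem.Chars.find cs t := (PySem.Chars.find_nonneg_iff cs t).mpr h
  obtain ⟨p1, p2⟩ := PySem.Chars.find_spec h0
  have := firstIdx_eq_of_spec p1 p2 h
  omega

-- occurrences inside a take are exactly the occurrences that fit below the cut
lemma prefix_drop_take_iff {t cs : List Char} {c i : Nat} (ht : t ≠ []) :
    t <+: (cs.take c).drop i ↔ (t <+: cs.drop i ∧ i + t.length ≤ c) := by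
  rw [List.drop_take, List.prefix_take_iff]
  constructor
  · rintro ⟨h1, h2⟩
    refine ⟨h1, ?_⟩
    have : 0 < t.length := List.length_pos_iff.mpr ht
    omega
  · rintro ⟨h1, h2⟩
    exact ⟨h1, by omega⟩

lemma infix_of_prefix_drop {t cs : List Char} {i : Nat} (h : t <+: cs.drop i) : t <:+: cs :=
  h.isInfix.trans (List.drop_suffix i cs).isInfix

-- ===== splitOn: head of the split is the prefix before the first occurrence =====

lemma splitOn_go_acc (sep : List Char) (fuel : Nat) (l cur : List Char) (acc : List (List Char)) :
    PySem.Chars.splitOn.go sep fuel l cur acc = acc.reverse ++ PySem.Chars.splitOn.go sep fuel l cur [] := by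
  induction fuel using Nat.strong_induction_on generalizing l cur acc with
  | _ fuel ih =>
    match fuel, l with
    | 0, l => simp [PySem.Chars.splitOn.go]
    | (f+1), [] => simp [PySem.Chars.splitOn.go]
    | (f+1), (c :: rest) =>
      simp only [PySem.Chars.splitOn.go]
      split
      · rw [ih f (by omega) _ _ (cur.reverse :: acc), ih f (by omega) _ _ [cur.reverse]]
        simp
      · exact ih f (by omega) _ _ _

-- cut index for the head of splitOn: first occurrence, or the whole string if absent
def fIdx (sep l : List Char) : Nat := if sep <:+: l then firstIdx sep l else l.length

lemma splitOn_go_head (sep : List Char) (hs : sep ≠ []) :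
    ∀ fuel l cur, l.length < fuel →
      ∃ rest, PySem.Chars.splitOn.go sep fuel l cur [] = (cur.reverse ++ l.take (fIdx sep l)) :: rest := by
  intro fuel
  induction fuel using Nat.strong_induction_on with
  | _ fuel ih =>
    intro l cur hlen
    match fuel, l with
    | 0, l => omega
    | (f+1), [] =>
      refine ⟨[], ?_⟩
      have : ¬ sep <:+: ([] : List Char) := fun h => hs (List.eq_nil_of_infix_nil h)
      simp [PySem.Chars.splitOn.go, fIdx, this]
    | (f+1), (c :: rest) =>
      simp only [PySem.Chars.splitOn.go]
      by_cases hp : sep.isPrefixOf (c :: rest)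
      · rw [if_pos hp, splitOn_go_acc]
        have hpre := List.isPrefixOf_iff_prefix.mp hp
        have hinf : sep <:+: c :: rest := hpre.isInfix
        have : firstIdx sep (c :: rest) = 0 := by simp [firstIdx, hp]
        refine ⟨PySem.Chars.splitOn.go sep f (List.drop sep.length (c :: rest)) [] [], ?_⟩
        simp [fIdx, hinf, this]
      · rw [if_neg hp]
        obtain ⟨r, hr⟩ := ih f (by omega) rest (c :: cur) (by simp at hlen; omega)
        refine ⟨r, ?_⟩
        rw [hr]
        have hstep : fIdx sep (c :: rest) = fIdx sep rest + 1 := by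
          by_cases hi : sep <:+: rest
          · have hinf : sep <:+: c :: rest := hi.trans (List.suffix_cons c rest).isInfix
            simp [fIdx, hi, hinf, firstIdx, hp]
          · have hni : ¬ sep <:+: c :: rest := by
              intro h
              rcases List.infix_cons_iff.mp h with h1 | h1
              · exact hp (List.isPrefixOf_iff_prefix.mpr h1)
              · exact hi h1
            simp [fIdx, hi, hni]
        simp [hstep, List.take_succ_cons]

lemma splitOn_head (sep l : List Char) (hs : sep ≠ []) :
    ∃ rest, PySem.Chars.splitOn l sep = (l.take (fIdx sep l)) :: rest := by
  obtain ⟨r, hr⟩ := splitOn_go_head sep hs (l.length + 1) l [] (by omega)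
  exact ⟨r, by simpa [PySem.Chars.splitOn] using hr⟩

-- ===== token table facts =====

lemma tok_nonempty : ∀ t ∈ cutTokens, t.toList ≠ [] := by decide

lemma tok_head : ∀ t ∈ cutTokens, t.toList[0]? = some ' ' ∨ t.toList[0]? = some ',' := by decide

lemma tok_interior : ∀ t ∈ cutTokens, ' ' ∉ t.toList.drop 1 ∧ ',' ∉ t.toList.drop 1 := by decide

-- a GoodCut never lands strictly inside a token occurrence
lemma hfit_of_goodCut {cs : List Char} {c : Nat} (hg : GoodCut cs c)
    {t : String} (ht : t ∈ cutTokens) (hinf : t.toList <:+: cs)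
    (hlt : firstIdx t.toList cs < c) : firstIdx t.toList cs + t.toList.length ≤ c := by
  by_contra hcon
  push_neg at hcon
  set i := firstIdx t.toList cs with hi
  -- cs[c]? is an interior character of t's occurrence
  obtain ⟨r, hr⟩ := (firstIdx_spec hinf).1
  have hcs : cs.drop i = t.toList ++ r := hr.symm
  have hkey : cs[c]? = t.toList[c - i]? := by
    have h1 : (cs.drop i)[c - i]? = cs[i + (c - i)]? := List.getElem?_drop
    rw [show i + (c - i) = c from by omega] at h1
    rw [hcs, List.getElem?_append_left (by omega)] at h1
    exact h1.symm
  have hadd := firstIdx_add_le hinf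
  rcases hg with hg | ⟨s, hsmem, hsinf, hsc⟩
  · omega
  · -- cs[c]? = s.toList[0]?, a space or comma
    obtain ⟨r', hr'⟩ := (firstIdx_spec hsinf).1
    have hcs' : cs.drop c = s.toList ++ r' := by rw [hsc]; exact hr'.symm
    have hs0 : cs[c]? = s.toList[0]? := by
      have h1 : (cs.drop c)[0]? = cs[c + 0]? := List.getElem?_drop
      rw [hcs', List.getElem?_append_left (by
        have := tok_nonempty s hsmem
        have : 0 < s.toList.length := List.length_pos_iff.mpr this
        omega)] at h1
      simpa using h1.symm
    -- interior char of t equals head char of s: contradiction with the token table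
    have hk1 : 1 ≤ c - i := by omega
    have hk2 : c - i < t.toList.length := by omega
    obtain ⟨ch, hch⟩ : ∃ ch, t.toList[c - i]? = some ch := by
      exact ⟨t.toList[c - i], List.getElem?_eq_getElem hk2⟩
    have hmem : ch ∈ t.toList.drop 1 := by
      apply List.mem_of_getElem? (i := c - i - 1)
      rw [List.getElem?_drop]
      rw [← hch]
      congr 1
      omega
    have hsch : s.toList[0]? = some ch := by rw [← hs0, hkey, hch]
    rcases tok_head s hsmem with h | h <;>
      [skip; skip] <;>
      · rw [h] at hsch
        obtain ⟨h1, h2⟩ := tok_interior t ht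
        simp at hsch
        first
        | exact h1 (hsch ▸ hmem)
        | exact h2 (hsch ▸ hmem)

-- first occurrence inside the prefix cs.take c equals the global first occurrence, when it fits
lemma firstIdx_take {t cs : List Char} {c : Nat} (ht : t ≠ []) (hinf : t <:+: cs)
    (hfit : firstIdx t cs + t.length ≤ c) : firstIdx t (cs.take c) = firstIdx t cs := by
  obtain ⟨q1, q2⟩ := firstIdx_spec hinf
  have hocc : t <+: (cs.take c).drop (firstIdx t cs) :=
    (prefix_drop_take_iff ht).mpr ⟨q1, hfit⟩
  have hinf' : t <:+: cs.take c := infix_of_prefix_drop hocc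
  symm
  apply firstIdx_eq_of_spec hocc _ hinf'
  intro i hi hpre
  exact q2 i hi ((prefix_drop_take_iff ht).mp hpre).1

-- ===== the per-token step, A's string form vs the pure stepN =====

lemma stepA_chars {cs : List Char} {c : Nat} (t : String) (ht : t ∈ cutTokens)
    (hc : c ≤ cs.length) (hg : GoodCut cs c) :
    (if PySem.Chars.isIn t.toList (cs.take c) = true
      then (PySem.Chars.splitOn (cs.take c) t.toList).headD []
      else cs.take c)
    = cs.take (stepN cs c t.toList) := by
  have htne := tok_nonempty t ht
  by_cases hin : PySem.Chars.isIn t.toList (cs.take c) = true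
  · rw [if_pos hin]
    obtain ⟨j, hj⟩ := (PySem.Chars.exists_prefix_drop_iff_isIn _ _).mpr hin
    obtain ⟨hocc, hfitj⟩ := (prefix_drop_take_iff htne).mp hj
    have hinf : t.toList <:+: cs := infix_of_prefix_drop hocc
    have hle : firstIdx t.toList cs ≤ j := by
      by_contra hlt
      exact (firstIdx_spec hinf).2 j (by omega) hocc
    have hfit : firstIdx t.toList cs + t.toList.length ≤ c := by omega
    have hlt : firstIdx t.toList cs < c := by
      have : 0 < t.toList.length := List.length_pos_iff.mpr htne
      omega
    obtain ⟨rest, hrest⟩ := splitOn_head t.toList (cs.take c) htne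
    rw [hrest]
    have hinf' : t.toList <:+: cs.take c := by
      have hocc' := (prefix_drop_take_iff htne).mpr ⟨(firstIdx_spec hinf).1, hfit⟩
      exact infix_of_prefix_drop hocc'
    have : fIdx t.toList (cs.take c) = firstIdx t.toList cs := by
      rw [fIdx, if_pos hinf', firstIdx_take htne hinf hfit]
    rw [List.headD_cons, this, List.take_take, stepN, if_pos ⟨hinf, hlt⟩]
    congr 1
    omega
  · rw [if_neg hin, stepN]
    rw [if_neg]
    rintro ⟨hinf, hlt⟩
    apply hin
    have hfit := hfit_of_goodCut hg ht hinf hlt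
    have hocc : t.toList <+: (cs.take c).drop (firstIdx t.toList cs) :=
      (prefix_drop_take_iff htne).mpr ⟨(firstIdx_spec hinf).1, hfit⟩
    exact (PySem.Chars.exists_prefix_drop_iff_isIn _ _).mp ⟨_, hocc⟩

-- A's step at String level, through the bridges
lemma stepA_str (s : String) (t : String) (ht : t ∈ cutTokens) :
    (if PySem.Str.isIn t s then ((PySem.Str.split? s t).getD []).headD "" else s).toList
    = (if PySem.Chars.isIn t.toList s.toList = true
        then (PySem.Chars.splitOn s.toList t.toList).headD []
        else s.toList) := by
  have htne := tok_nonempty t ht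
  rw [PySem.Str.isIn_eq]
  by_cases hin : PySem.Chars.isIn t.toList s.toList = true
  · rw [if_pos hin, if_pos hin]
    have hsplit := PySem.Str.split?_map s t
    rw [PySem.Chars.split?] at hsplit
    rw [if_neg (by simpa using htne)] at hsplit
    obtain ⟨rest, hrest⟩ := splitOn_head t.toList s.toList htne
    match hps : PySem.Str.split? s t with
    | none => rw [hps] at hsplit; simp at hsplit
    | some ps =>
      rw [hps] at hsplit
      simp only [Option.map_some, Option.some.injEq] at hsplit
      rw [Option.getD_some]
      match ps, hsplit with
      | [], h => rw [hrest] at h; simp at h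
      | p :: ps', h =>
        rw [hrest] at h
        simp only [List.map_cons, List.cons.injEq] at h
        simp [h.1, hrest]
  · rw [if_neg hin, if_neg hin]

-- A's fold equals take of the stepN fold, and the cut stays good
lemma foldA (cs : List Char) :
    ∀ (L : List String), (∀ t ∈ L, t ∈ cutTokens) → ∀ (s : String) (c : Nat),
      s.toList = cs.take c → c ≤ cs.length → GoodCut cs c →
      (L.foldl (fun s tok =>
        if PySem.Str.isIn tok s then ((PySem.Str.split? s tok).getD []).headD "" else s) s).toList
        = cs.take (L.foldl (fun c tok => stepN cs c tok.toList) c)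
      ∧ L.foldl (fun c tok => stepN cs c tok.toList) c ≤ cs.length
      ∧ GoodCut cs (L.foldl (fun c tok => stepN cs c tok.toList) c) := by
  intro L
  induction L with
  | nil => intro _ s c hs hc hg; exact ⟨hs, hc, hg⟩
  | cons t L ih =>
    intro hmem s c hs hc hg
    have ht : t ∈ cutTokens := hmem t (by simp)
    simp only [List.foldl_cons]
    apply ih (fun x hx => hmem x (by simp [hx]))
    · rw [stepA_str _ _ ht, hs, stepA_chars t ht hc hg]
    · rw [stepN]; split
      · exact firstIdx_le_length _ _
      · exact hc
    · rw [stepN]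
      split
      · rename_i hcond
        exact Or.inr ⟨t, ht, hcond.1, rfl⟩
      · exact hg

-- B's Int fold equals the stepN fold
lemma foldB (name : String) :
    ∀ (L : List String), ∀ (c : Nat), c ≤ name.toList.length →
      (L.foldl (fun (m : Int) tok =>
        let i := PySem.Str.find name tok
        if i ≠ -1 ∧ i < m then i else m) (c : Int))
      = ((L.foldl (fun c tok => stepN name.toList c tok.toList) c : Nat) : Int) := by
  intro L
  induction L with
  | nil => intro c _; rfl
  | cons t L ih =>
    intro c hc
    simp only [List.foldl_cons]
    have hfind := PySem.Str.find_eq name t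
    by_cases hinf : t.toList <:+: name.toList
    · have hf : PySem.Str.find name t = (firstIdx t.toList name.toList : Int) := by
        rw [hfind, find_eq_firstIdx hinf]
      by_cases hlt : firstIdx t.toList name.toList < c
      · rw [show (if PySem.Str.find name t ≠ -1 ∧ PySem.Str.find name t < (c : Int)
              then PySem.Str.find name t else (c : Int)) = ((firstIdx t.toList name.toList : Nat) : Int) by
            rw [hf]; rw [if_pos ⟨by omega, by omega⟩]]
        rw [show stepN name.toList c t.toList = firstIdx t.toList name.toList by
            rw [stepN, if_pos ⟨hinf, hlt⟩]]
        exact ih _ (le_trans (firstIdx_le_length _ _) (le_refl _))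
      · rw [show (if PySem.Str.find name t ≠ -1 ∧ PySem.Str.find name t < (c : Int)
              then PySem.Str.find name t else (c : Int)) = ((c : Nat) : Int) by
            rw [hf]; rw [if_neg (by omega)]]
        rw [show stepN name.toList c t.toList = c by rw [stepN, if_neg (fun h => hlt h.2)]]
        exact ih _ hc
    · have hf : PySem.Str.find name t = -1 := by
        rw [hfind]; exact (PySem.Chars.find_eq_neg_one_iff _ _).mpr hinf
      rw [show (if PySem.Str.find name t ≠ -1 ∧ PySem.Str.find name t < (c : Int)
            then PySem.Str.find name t else (c : Int)) = ((c : Nat) : Int) by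
          rw [hf]; rw [if_neg (by simp)]]
      rw [show stepN name.toList c t.toList = c by rw [stepN, if_neg (fun h => hinf h.1)]]
      exact ih _ hc

-- ===== VERDICT (by name: the statement is the Claim_ definition above) =====
set_option maxRecDepth 4000 in
theorem shorten_company_name_spec : Claim_equal_shorten_company_name := by
  intro name _
  unfold Spec_shorten_company_name shorten_company_name shorten_company_name_alt
  by_cases hne : name = ""
  · simp [hne]
  · rw [if_neg hne, if_neg hne]
    have hA := (foldA name.toList cutTokens (fun _ h => h) name name.toList.length
      (by simp) (le_refl _) (Or.inl rfl)).1
    have hB := foldB name cutTokens name.toList.length (le_refl _)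
    have key : ∀ n : Nat, (cutTokens.foldl (fun s tok =>
          if PySem.Str.isIn tok s then ((PySem.Str.split? s tok).getD []).headD "" else s) name).toList
          = name.toList.take n →
        PySem.Str.strip (cutTokens.foldl (fun s tok =>
          if PySem.Str.isIn tok s then ((PySem.Str.split? s tok).getD []).headD "" else s) name)
        = PySem.Str.strip (PySem.Str.slice name none (some (n : Int))) := by
      intro n h
      apply String.toList_injective
      rw [PySem.Str.toList_strip, PySem.Str.toList_strip, PySem.Str.toList_slice]
      simp only [PySem.Chars.slice_eq_listSlice]
      rw [PySem.List.slice_to_natCast]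
      exact congrArg _ h
    have hshort := key _ hA
    rw [PySem.Str.len_eq name, hB]
    simp only [hshort]
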